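-- pv_equiv track=rewrite | github.com/justlebadura/proyecto-cortex-grupo-1 | backend/main.py | is_matplotlib_code
-- ===== SOURCE A (Python) =====
-- def is_matplotlib_code(code: str) -> bool:
--     c = (code or "")
--     matplotlib_tokens = [
--         "import matplotlib",
--         "import matplotlib.pyplot as plt",
--         "from matplotlib",
--         "plt.",
--         "figure(",
--         "subplots(",
--         "plot(",
--         "scatter(",
--         "bar(",
--         "hist(",
--         "imshow(",
--     ]
--     return any(t in c for t in matplotlib_tokens)
-- ===== SOURCE B (Python) =====
-- def is_matplotlib_code(code: str) -> bool:
--     # Single left-to-right scan with first-character dispatch: at each position,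
--     # only the tokens beginning with that character are tested.  The token
--     # "import matplotlib.pyplot as plt" is dropped because any occurrence of it
--     # contains "import matplotlib", so the boolean result is unchanged.
--     c = code or ""
--     i, n = 0, len(c)
--     while i < n:
--         ch = c[i]
--         if ch == 'i':
--             if c.startswith("import matplotlib", i) or c.startswith("imshow(", i):
--                 return True
--         elif ch == 'f':
--             if c.startswith("from matplotlib", i) or c.startswith("figure(", i):
--                 return True
--         elif ch == 'p':
--             if c.startswith("plt.", i) or c.startswith("plot(", i):
--                 return True
--         elif ch == 's':
--             if c.startswith("subplots(", i) or c.startswith("scatter(", i):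
--                 return True
--         elif ch == 'b':
--             if c.startswith("bar(", i):
--                 return True
--         elif ch == 'h':
--             if c.startswith("hist(", i):
--                 return True
--         i += 1
--     return False
-- ===== Notes on version B (the rewrite author's own statement) =====
-- stated objective: alternative
-- what changed: Replaces A's per-token full substring scans by one left-to-right position scan with first-character dispatch (only tokens starting with the current character are tested), and drops the redundant token 'import matplotlib.pyplot as plt' which always contains 'import matplotlib'.
import Mathlib
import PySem

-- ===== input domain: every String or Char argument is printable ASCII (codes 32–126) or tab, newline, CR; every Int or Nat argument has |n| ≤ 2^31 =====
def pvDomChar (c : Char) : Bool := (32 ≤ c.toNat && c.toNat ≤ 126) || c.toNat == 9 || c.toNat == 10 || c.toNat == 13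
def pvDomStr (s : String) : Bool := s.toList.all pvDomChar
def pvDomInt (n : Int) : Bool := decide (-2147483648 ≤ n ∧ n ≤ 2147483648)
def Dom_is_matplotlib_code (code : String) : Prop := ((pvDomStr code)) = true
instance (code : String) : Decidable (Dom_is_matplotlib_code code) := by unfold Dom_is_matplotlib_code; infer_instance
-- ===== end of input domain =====

-- B replaces A's per-token substring scans by one position scan with first-character
-- dispatch (dropping the redundant long token); alternative decomposition, same result.


-- ===== PORT A =====
def pvTokensA : List String :=
  ["import matplotlib", "import matplotlib.pyplot as plt", "from matplotlib",
   "plt.", "figure(", "subplots(", "plot(", "scatter(", "bar(", "hist(", "imshow("]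

-- `code or ""` is the identity on strings for the return value of `t in c`
def is_matplotlib_code (code : String) : Bool :=
  pvTokensA.any (fun t => PySem.Str.isIn t code)

-- ===== PORT B =====
-- the per-position first-character dispatch (the if/elif chain of Source B's loop body)
def pvHit (s : List Char) : Bool :=
  match s with
  | [] => false
  | ch :: _ =>
    if ch = 'i' then
      PySem.Chars.startswith s "import matplotlib".toList || PySem.Chars.startswith s "imshow(".toList
    else if ch = 'f' then
      PySem.Chars.startswith s "from matplotlib".toList || PySem.Chars.startswith s "figure(".toList
    else if ch = 'p' then
      PySem.Chars.startswith s "plt.".toList || PySem.Chars.startswith s "plot(".toList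
    else if ch = 's' then
      PySem.Chars.startswith s "subplots(".toList || PySem.Chars.startswith s "scatter(".toList
    else if ch = 'b' then
      PySem.Chars.startswith s "bar(".toList
    else if ch = 'h' then
      PySem.Chars.startswith s "hist(".toList
    else false

-- Source B's while loop: advance one character at a time, stopping at the first hit
def pvScan : List Char → Bool
  | [] => false
  | ch :: rest => pvHit (ch :: rest) || pvScan rest

def is_matplotlib_code_alt (code : String) : Bool := pvScan code.toList

-- ===== PRECONDITION & SPEC =====
def Spec_is_matplotlib_code (code : String) (out : Bool) : Prop := out = is_matplotlib_code_alt code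
instance (code : String) (out : Bool) : Decidable (Spec_is_matplotlib_code code out) := by unfold Spec_is_matplotlib_code; infer_instance

-- ===== CLAIM (what is proved, stated in full; the proofs are below) =====
def Claim_equal_is_matplotlib_code : Prop := ∀ (code : String), Dom_is_matplotlib_code code → Spec_is_matplotlib_code code (is_matplotlib_code code)

-- ===== LEMMAS AND PROOFS =====

-- the scan succeeds iff the dispatch fires at some suffix
theorem pv_scan_iff (cs : List Char) :
    pvScan cs = true ↔ ∃ j, pvHit (cs.drop j) = true := by
  induction cs with
  | nil =>
    simp only [pvScan, List.drop_nil]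
    constructor
    · intro h; exact absurd h (by decide)
    · rintro ⟨j, hj⟩; exact absurd hj (by simp [pvHit])
  | cons c cs ih =>
    simp only [pvScan, Bool.or_eq_true, ih]
    constructor
    · rintro (h | ⟨j, hj⟩)
      · exact ⟨0, h⟩
      · exact ⟨j + 1, hj⟩
    · rintro ⟨j, hj⟩
      cases j with
      | zero => exact Or.inl hj
      | succ j => exact Or.inr ⟨j, hj⟩

-- the dispatch at a position fires iff some token of A's list is a prefix there
theorem pv_hit_iff (s : List Char) :
    pvHit s = true ↔ ∃ t ∈ pvTokensA, t.toList <+: s := by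
  constructor
  · intro h
    match s with
    | [] => exact absurd h (by simp [pvHit])
    | ch :: rest =>
      simp only [pvHit] at h
      split_ifs at h <;>
        simp only [Bool.or_eq_true, PySem.Chars.startswith_iff] at h
      · rcases h with h | h
        · exact ⟨"import matplotlib", by decide, h⟩
        · exact ⟨"imshow(", by decide, h⟩
      · rcases h with h | h
        · exact ⟨"from matplotlib", by decide, h⟩
        · exact ⟨"figure(", by decide, h⟩
      · rcases h with h | h
        · exact ⟨"plt.", by decide, h⟩
        · exact ⟨"plot(", by decide, h⟩
      · rcases h with h | h
        · exact ⟨"subplots(", by decide, h⟩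
        · exact ⟨"scatter(", by decide, h⟩
      · exact ⟨"bar(", by decide, h⟩
      · exact ⟨"hist(", by decide, h⟩
  · rintro ⟨t, hmem, hpre⟩
    -- for the long token "import matplotlib.pyplot as plt" the 'i'-branch fires via
    -- its prefix "import matplotlib"; every other token is tested verbatim in its branch
    fin_cases hmem <;> obtain ⟨r, rfl⟩ := hpre <;>
      simp [pvHit, PySem.Chars.startswith_iff]

-- ===== VERDICT (by name: the statement is the Claim_ definition above) =====
theorem is_matplotlib_code_spec : Claim_equal_is_matplotlib_code := by
  intro code _
  unfold Spec_is_matplotlib_code is_matplotlib_code is_matplotlib_code_alt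
  rw [Bool.eq_iff_iff, pv_scan_iff]
  simp only [List.any_eq_true, PySem.Str.isIn_eq]
  constructor
  · rintro ⟨t, hmem, ht⟩
    obtain ⟨j, hj⟩ := (PySem.Chars.exists_prefix_drop_iff_isIn _ _).mpr ht
    exact ⟨j, (pv_hit_iff _).mpr ⟨t, hmem, hj⟩⟩
  · rintro ⟨j, hj⟩
    obtain ⟨t, hmem, hpre⟩ := (pv_hit_iff _).mp hj
    exact ⟨t, hmem, (PySem.Chars.exists_prefix_drop_iff_isIn _ _).mp ⟨j, hpre⟩⟩
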